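-- pv_equiv track=rewrite | github.com/RiverDong/- | src/cs_qa_system_torch/help_doc/help_doc.py | _concatenate_str
-- ===== SOURCE A (Python) =====
-- from typing import Callable, Dict, List, Optional, Tuple, Union
--
-- def _concatenate_str(all_s: List[str]) -> List[str]:
--     # For each string in the list "all_s", concatenate the next string to it
--     # if it is very short, or it ends with ":" and is not very long
--     if len(all_s) <= 1:
--         return all_s
--
--     next_must_be_concatenated_to_last = False
--     result = list()
--     for s in all_s:
--         if next_must_be_concatenated_to_last:
--             result[-1] += ' ' + s
--         else:
--             result.append(s)
--         next_must_be_concatenated_to_last = (len(s.split()) <= 5) or (s.rstrip()[-1] == ':' and len(s.split()) <= 20)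
--
--     assert ' '.join(result) == ' '.join(all_s)
--     return result
-- ===== SOURCE B (Python) =====
-- from typing import List
--
-- def _concatenate_str(all_s: List[str]) -> List[str]:
--     # Right-to-left single pass: walk the list in reverse, merging each string
--     # into the start of the most recent group when its own flag says the next
--     # line should be glued on; reverse the group list at the end.
--     if len(all_s) <= 1:
--         return all_s
--     result_rev = []
--     for s in reversed(all_s):
--         if result_rev and ((len(s.split()) <= 5) or (s.rstrip()[-1] == ':' and len(s.split()) <= 20)):
--             result_rev[-1] = s + ' ' + result_rev[-1]
--         else:
--             result_rev.append(s)
--     return result_rev[::-1]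
-- ===== Notes on version B (the rewrite author's own statement) =====
-- stated objective: alternative
-- what changed: Replaces A's forward pass that threads a carry flag through a stateful loop with a right-to-left pass: each string is glued onto the front of the most recently built group when its own flag holds, and the group list is reversed at the end, so no flag state is carried between iterations.
import Mathlib
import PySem

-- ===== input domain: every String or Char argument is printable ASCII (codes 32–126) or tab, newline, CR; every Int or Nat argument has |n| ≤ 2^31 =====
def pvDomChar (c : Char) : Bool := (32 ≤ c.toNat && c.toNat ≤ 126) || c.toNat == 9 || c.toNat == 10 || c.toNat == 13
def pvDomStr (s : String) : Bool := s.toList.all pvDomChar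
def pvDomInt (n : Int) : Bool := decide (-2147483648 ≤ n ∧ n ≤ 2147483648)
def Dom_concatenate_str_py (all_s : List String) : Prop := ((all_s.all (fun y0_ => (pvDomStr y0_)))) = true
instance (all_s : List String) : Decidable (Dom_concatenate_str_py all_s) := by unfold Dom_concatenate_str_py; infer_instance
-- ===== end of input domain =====

-- B rewrites A's forward stateful pass as a right-to-left pass over the reversed list
-- (alternative decomposition; same asymptotic cost). A = B on all inputs (A is total).


-- ===== PORT A =====
-- shared helper: the flag '(len(s.split()) <= 5) or (s.rstrip()[-1] == ":" and len(s.split()) <= 20)'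
-- (both Pythons contain this exact expression; pyGet? returns none where Python's [-1] would raise,
--  which is unreachable because the first disjunct short-circuits on whitespace-only strings)
def pvFlag (s : String) : Bool :=
  decide ((PySem.Str.split₀ s).length ≤ 5) ||
  ((PySem.Str.pyGet? (PySem.Str.rstrip s) (-1) == some ':') && decide ((PySem.Str.split₀ s).length ≤ 20))

-- literal port of A: one forward loop carrying (next_must_be_concatenated_to_last, result)
def concatenate_str_py (all_s : List String) : List String :=
  if all_s.length ≤ 1 then all_s
  else
    (all_s.foldl
      (fun (st : Bool × List String) s =>
        let res := if st.1 then st.2.dropLast ++ [PySem.List.pyGetD st.2 (-1) "" ++ " " ++ s] else st.2 ++ [s]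
        (pvFlag s, res))
      (false, [])).2

-- ===== PORT B =====
-- literal port of B: loop over reversed(all_s), glue s onto the last group when its flag holds,
-- then result_rev[::-1]
def concatenate_str_py_alt (all_s : List String) : List String :=
  if all_s.length ≤ 1 then all_s
  else
    (all_s.reverse.foldl
      (fun (acc : List String) s =>
        if !acc.isEmpty && pvFlag s then acc.dropLast ++ [s ++ " " ++ PySem.List.pyGetD acc (-1) ""]
        else acc ++ [s])
      []).reverse

-- ===== PRECONDITION & SPEC =====
def Spec_concatenate_str_py (all_s : List String) (out : List String) : Prop := out = concatenate_str_py_alt all_s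
instance (all_s : List String) (out : List String) : Decidable (Spec_concatenate_str_py all_s out) := by unfold Spec_concatenate_str_py; infer_instance

-- ===== CLAIM (what is proved, stated in full; the proofs are below) =====
def Claim_equal_concatenate_str_py : Prop := ∀ (all_s : List String), Dom_concatenate_str_py all_s → Spec_concatenate_str_py all_s (concatenate_str_py all_s)

-- ===== LEMMAS AND PROOFS =====

-- canonical form: pvH cur prev xs = the chunk list, given the chunk built so far (cur)
-- and the raw element last consumed (prev), whose flag decides whether the next raw
-- element is glued on.
def pvH (cur prev : String) : List String → List String
  | [] => [cur]
  | s :: rest => if pvFlag prev then pvH (cur ++ " " ++ s) s rest else cur :: pvH s s rest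

theorem pvH_ne_nil (cur prev : String) (xs : List String) : pvH cur prev xs ≠ [] := by
  induction xs generalizing cur prev with
  | nil => simp [pvH]
  | cons s rest ih =>
    simp only [pvH]
    split
    · exact ih _ _
    · simp

-- prepending text onto the current chunk only changes the head of the result
theorem pvH_prepend (a : String) (xs : List String) :
    ∀ cur prev, pvH (a ++ " " ++ cur) prev xs
      = (a ++ " " ++ (pvH cur prev xs).head!) :: (pvH cur prev xs).tail := by
  induction xs with
  | nil => intro cur prev; simp [pvH]
  | cons s rest ih =>
    intro cur prev
    simp only [pvH]
    by_cases h : pvFlag prev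
    · simp only [h, if_true]
      have := ih (cur ++ " " ++ s) s
      simp only [String.append_assoc] at this ⊢
      exact this
    · simp [h]

-- A's loop, started on a nonempty result, computes pvH on the remaining input
theorem foldA_eq (xs : List String) :
    ∀ (res : List String) (cur prev : String),
    (xs.foldl
      (fun (st : Bool × List String) s =>
        let r := if st.1 then st.2.dropLast ++ [PySem.List.pyGetD st.2 (-1) "" ++ " " ++ s] else st.2 ++ [s]
        (pvFlag s, r))
      (pvFlag prev, res ++ [cur])).2 = res ++ pvH cur prev xs := by
  induction xs with
  | nil => intro res cur prev; simp [pvH]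
  | cons s rest ih =>
    intro res cur prev
    simp only [List.foldl_cons]
    by_cases h : pvFlag prev
    · have hstep :
        (if pvFlag prev then (res ++ [cur]).dropLast ++ [PySem.List.pyGetD (res ++ [cur]) (-1) "" ++ " " ++ s]
         else (res ++ [cur]) ++ [s]) = res ++ [cur ++ " " ++ s] := by
        simp [h, PySem.List.pyGetD_neg_one_append_singleton]
      rw [hstep]
      rw [ih res (cur ++ " " ++ s) s]
      simp [pvH, h]
    · have hstep :
        (if pvFlag prev then (res ++ [cur]).dropLast ++ [PySem.List.pyGetD (res ++ [cur]) (-1) "" ++ " " ++ s]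
         else (res ++ [cur]) ++ [s]) = (res ++ [cur]) ++ [s] := by
        simp [h]
      rw [hstep]
      rw [ih (res ++ [cur]) s s]
      simp [pvH, h]

-- B's end-of-list accumulator operations mirror head-of-list operations on the reverse
theorem foldB_mirror (ys : List String) :
    ∀ (acc : List String),
    (ys.foldl
      (fun (acc : List String) s =>
        if !acc.isEmpty && pvFlag s then acc.dropLast ++ [s ++ " " ++ PySem.List.pyGetD acc (-1) ""]
        else acc ++ [s])
      acc)
    = (ys.foldl
        (fun (r : List String) s =>
          if !r.isEmpty && pvFlag s then (s ++ " " ++ r.head!) :: r.tail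
          else s :: r)
        acc.reverse).reverse := by
  induction ys with
  | nil => intro acc; simp
  | cons s rest ih =>
    intro acc
    simp only [List.foldl_cons]
    rw [ih]
    congr 1
    rcases List.eq_nil_or_concat acc with rfl | ⟨init, a, rfl⟩
    · simp
    · by_cases h : pvFlag s
      · simp [h, PySem.List.pyGetD_neg_one_append_singleton]
      · simp [h]

-- the mirrored fold over the reversed input, i.e. a right fold, computes pvH
theorem foldB_eq (xs : List String) :
    ∀ (x : String),
    ((x :: xs).foldr
      (fun s (r : List String) =>
        if !r.isEmpty && pvFlag s then (s ++ " " ++ r.head!) :: r.tail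
        else s :: r)
      []) = pvH x x xs := by
  induction xs with
  | nil => intro x; simp [pvH]
  | cons s rest ih =>
    intro x
    have hrec : ((s :: rest).foldr
        (fun s (r : List String) =>
          if !r.isEmpty && pvFlag s then (s ++ " " ++ r.head!) :: r.tail
          else s :: r) []) = pvH s s rest := ih s
    simp only [List.foldr_cons] at hrec ⊢
    rw [hrec]
    by_cases h : pvFlag x
    · have hne : pvH s s rest ≠ [] := pvH_ne_nil s s rest
      simp only [h, List.isEmpty_eq_false_iff.mpr hne, Bool.not_false, Bool.true_and, if_true]
      have := pvH_prepend x rest s s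
      simp only [pvH, h, if_true]
      rw [this]
    · have hne : pvH s s rest ≠ [] := pvH_ne_nil s s rest
      simp [pvH, h]

-- ===== VERDICT (by name: the statement is the Claim_ definition above) =====
theorem concatenate_str_py_spec : Claim_equal_concatenate_str_py := by
  intro all_s _
  unfold Spec_concatenate_str_py concatenate_str_py concatenate_str_py_alt
  by_cases hlen : all_s.length ≤ 1
  · simp [hlen]
  · simp only [hlen, if_false]
    obtain ⟨x, xs, rfl⟩ : ∃ x xs, all_s = x :: xs := by
      cases all_s with
      | nil => simp at hlen
      | cons x xs => exact ⟨x, xs, rfl⟩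
    -- A side: first iteration appends x, then foldA_eq applies
    have hA :
      ((x :: xs).foldl
        (fun (st : Bool × List String) s =>
          let r := if st.1 then st.2.dropLast ++ [PySem.List.pyGetD st.2 (-1) "" ++ " " ++ s] else st.2 ++ [s]
          (pvFlag s, r))
        (false, [])).2 = pvH x x xs := by
      simp only [List.foldl_cons]
      have := foldA_eq xs [] x x
      simpa using this
    -- B side: mirror the end-operations, turn foldl-over-reverse into foldr, apply foldB_eq
    have hB :
      ((x :: xs).reverse.foldl
        (fun (acc : List String) s =>
          if !acc.isEmpty && pvFlag s then acc.dropLast ++ [s ++ " " ++ PySem.List.pyGetD acc (-1) ""]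
          else acc ++ [s])
        []).reverse = pvH x x xs := by
      rw [foldB_mirror]
      rw [List.reverse_reverse]
      rw [List.foldl_reverse]
      exact foldB_eq xs x
    rw [hA, hB]
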